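-- pv_equiv track=rewrite | github.com/sonic5739/tarju | Cos Pro 2급/2차시/문제 5.py | soiution
-- ===== SOURCE A (Python) =====
-- def soiution(attack,recovery, hp) :
--     count = 0
--     while(True) :
--         count += 1
--         hp -=attack
--         if hp <= 0 :
--             break
--         hp += recovery
--     return count
-- ===== SOURCE B (Python) =====
-- def soiution(attack, recovery, hp):
--     # One closed-form ceiling division instead of simulating each turn.
--     remaining = hp - attack
--     if remaining <= 0:
--         return 1
--     return 1 + -(-remaining // (attack - recovery))
-- ===== Notes on version B (the rewrite author's own statement) =====
-- stated objective: alternative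
-- what changed: Replaces the turn-by-turn combat simulation loop with a single closed-form ceiling division 1 + ceil((hp-attack)/(attack-recovery)).
import Mathlib
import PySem

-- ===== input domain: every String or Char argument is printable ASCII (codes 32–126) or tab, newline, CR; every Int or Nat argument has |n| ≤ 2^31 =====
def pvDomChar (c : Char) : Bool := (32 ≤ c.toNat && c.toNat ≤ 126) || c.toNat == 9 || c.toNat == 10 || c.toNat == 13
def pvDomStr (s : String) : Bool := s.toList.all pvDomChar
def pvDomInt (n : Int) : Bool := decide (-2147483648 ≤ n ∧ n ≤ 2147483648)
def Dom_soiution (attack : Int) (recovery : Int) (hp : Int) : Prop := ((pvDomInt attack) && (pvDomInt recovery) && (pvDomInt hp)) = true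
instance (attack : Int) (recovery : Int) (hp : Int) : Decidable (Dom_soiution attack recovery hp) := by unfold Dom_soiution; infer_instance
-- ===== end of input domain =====

-- B replaces A's turn-by-turn combat simulation with one closed-form ceiling division.


-- ===== PORT A =====
-- A's while-True loop, fuel-bounded for totality; under Pre_soiution the fuel is never exhausted.
def soiutionLoop (attack : Int) (recovery : Int) : Nat → Int → Int → Int
  | 0, _, count => count
  | fuel + 1, hp, count =>
      let count := count + 1
      let hp := hp - attack
      if hp ≤ 0 then count
      else soiutionLoop attack recovery fuel (hp + recovery) count

def soiution (attack : Int) (recovery : Int) (hp : Int) : Int :=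
  soiutionLoop attack recovery ((hp - attack).toNat + 2) hp 0

-- ===== PORT B =====
def soiution_alt (attack : Int) (recovery : Int) (hp : Int) : Int :=
  let remaining := hp - attack
  if remaining ≤ 0 then 1
  else 1 + -(PySem.Int.floordiv (-remaining) (attack - recovery))

-- ===== PRECONDITION & SPEC =====
-- Pre_ excludes exactly the inputs on which A's loop never terminates
-- (first hit leaves hp positive and the attack does not exceed the recovery).
def Pre_soiution (attack : Int) (recovery : Int) (hp : Int) : Prop :=
  hp - attack ≤ 0 ∨ recovery < attack
instance (attack : Int) (recovery : Int) (hp : Int) : Decidable (Pre_soiution attack recovery hp) := by unfold Pre_soiution; infer_instance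

def pvWitness_soiution : Int × Int × Int := (7, 3, 20)

def Spec_soiution (attack : Int) (recovery : Int) (hp : Int) (out : Int) : Prop := out = soiution_alt attack recovery hp
instance (attack : Int) (recovery : Int) (hp : Int) (out : Int) : Decidable (Spec_soiution attack recovery hp out) := by unfold Spec_soiution; infer_instance

-- ===== CLAIM (what is proved, stated in full; the proofs are below) =====
def Claim_equal_soiution : Prop := ∀ (attack : Int) (recovery : Int) (hp : Int), Dom_soiution attack recovery hp → Pre_soiution attack recovery hp → Spec_soiution attack recovery hp (soiution attack recovery hp)

-- ===== LEMMAS AND PROOFS =====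

-- Value of the ceiling-division expression at the heart of B, bracketed.
theorem alt_pos (attack recovery hp : Int) (h : ¬ hp - attack ≤ 0) :
    soiution_alt attack recovery hp
      = 1 + -(PySem.Int.floordiv (-(hp - attack)) (attack - recovery)) := by
  simp [soiution_alt, h]

-- Main loop invariant: with positive net damage and enough fuel, the loop
-- returns count + (B's closed form).
theorem loop_eq_alt (attack recovery : Int) (hd : recovery < attack) :
    ∀ (fuel : Nat) (hp count : Int), (hp - attack).toNat < fuel →
      soiutionLoop attack recovery fuel hp count = count + soiution_alt attack recovery hp := by
  intro fuel
  induction fuel with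
  | zero => intro hp count h; omega
  | succ n ih =>
    intro hp count h
    by_cases h0 : hp - attack ≤ 0
    · simp [soiutionLoop, h0, soiution_alt]
    · have hrec := ih (hp - attack + recovery) (count + 1) (by omega)
      rw [show soiutionLoop attack recovery (n+1) hp count
            = soiutionLoop attack recovery n (hp - attack + recovery) (count + 1) by
          simp [soiutionLoop, h0]]
      rw [hrec, alt_pos attack recovery hp h0]
      have hdpos : (0 : Int) < attack - recovery := by omega
      by_cases h1 : hp - attack + recovery - attack ≤ 0
      · -- next iteration stops: the ceiling is 1
        have hone : -(PySem.Int.floordiv (-(hp - attack)) (attack - recovery)) = 1 :=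
          (PySem.Int.neg_floordiv_neg_eq_iff_of_pos hdpos).mpr (by constructor <;> nlinarith)
        have halt1 : soiution_alt attack recovery (hp - attack + recovery) = 1 := by
          unfold soiution_alt; rw [if_pos (by omega)]
        rw [halt1, hone]; ring
      · -- next iteration keeps going: the ceiling decreases by exactly 1
        have hc := (PySem.Int.neg_floordiv_neg_eq_iff_of_pos (a := hp - attack)
          (q := -(PySem.Int.floordiv (-(hp - attack)) (attack - recovery))) hdpos).mp rfl
        have hstep : -(PySem.Int.floordiv (-(hp - attack + recovery - attack)) (attack - recovery))
            = -(PySem.Int.floordiv (-(hp - attack)) (attack - recovery)) - 1 :=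
          (PySem.Int.neg_floordiv_neg_eq_iff_of_pos hdpos).mpr
            (by constructor <;> nlinarith [hc.1, hc.2])
        rw [alt_pos attack recovery _ h1, hstep]; ring

-- ===== VERDICT (by name: the statement is the Claim_ definition above) =====
theorem soiution_spec : Claim_equal_soiution := by
  intro attack recovery hp _ hpre
  unfold Spec_soiution soiution
  by_cases h0 : hp - attack ≤ 0
  · simp [soiutionLoop, h0, soiution_alt]
  · rcases hpre with h | h
    · omega
    · exact (loop_eq_alt attack recovery h _ hp 0 (by omega)).trans (by ring)
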